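-- pv_equiv track=rewrite | github.com/Gyuminn/Algorithm | programmers/2021_kako_blind/lv2_메뉴리뉴얼.py | solution
-- ===== SOURCE A (Python) =====
-- def solution(orders, course):
--     answer = []
--
--     dict = {}
--
--     # dfs로 가능한 조합을 구해 dict에 조합이 나온 개수를 저장
--     def dfs(level, start, origin, comb, limit):
--         if (level == limit):
--             dict[comb] = dict.get(comb, 0) + 1
--             return
--
--         for i in range(start, len(origin)):
--             dfs(level + 1, i + 1, origin, comb + origin[i], limit)
--
--     # 주어진 코스들을 dfs를 통해 모두 반복
--     for order in orders:
--         order = sorted(order)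
--         for limit in range(1, len(order) + 1):
--             dfs(0, 0, order, "", limit)
--
--
--     for num in course:
--         temp = []
--         # 지정된 개수에 맞게 코스 요리를 모은다.
--         for k,v in dict.items():
--             if len(k) == num and v >= 2:
--                 temp.append((k,v))
--
--         # 임시 리스트에 넣어준 값이 있다면 value의 최대값을 먼저 구하고
--         # value 최대값과 일치하는 key의 값을 반환하여 answer에 넣어준다.
--         if len(temp):
--             max_value = max(temp, key=lambda x: x[1])[1]
--             result = [x[0] for x in temp if x[1] == max_value]
--
--             for i in result:
--                 answer.append(i)
--
--     answer = sorted(answer)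
--     return answer
-- ===== SOURCE B (Python) =====
-- def _combs(chars, k):
--     # all combinations of k characters of `chars` taken by position, in order
--     if k == 0:
--         return [""]
--     if len(chars) < k:
--         return []
--     head, rest = chars[0], chars[1:]
--     return [head + t for t in _combs(rest, k - 1)] + _combs(rest, k)
--
--
-- def solution(orders, course):
--     # lengths actually asked for (positive, deduplicated)
--     need = []
--     for num in sorted(set(course)):
--         if num >= 1:
--             need.append(num)
--     # one counting dict per requested length; only combinations of those
--     # lengths are ever generated
--     buckets = {}
--     for order in orders:
--         chars = "".join(sorted(order))
--         for k in need:          # need is ascending: once k exceeds the order, stop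
--             if k > len(chars):
--                 break
--             cnt = buckets.setdefault(k, {})
--             for comb in _combs(chars, k):
--                 cnt[comb] = cnt.get(comb, 0) + 1
--     answer = []
--     for num in course:
--         cnt = buckets.get(num, {})
--         best = 0
--         for v in cnt.values():
--             if v >= 2 and v > best:
--                 best = v
--         if best:
--             for comb, v in cnt.items():
--                 if v == best:
--                     answer.append(comb)
--     answer.sort()
--     return answer
-- ===== Notes on version B (the rewrite author's own statement) =====
-- stated objective: faster
-- what changed: Instead of DFS-enumerating every subset of every order into one global dict and filtering it per course size, B generates only combinations whose length is actually requested in course (structural pick/skip recursion on the sorted order) into one counting dict per length, then takes the max per bucket.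
import Mathlib
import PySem

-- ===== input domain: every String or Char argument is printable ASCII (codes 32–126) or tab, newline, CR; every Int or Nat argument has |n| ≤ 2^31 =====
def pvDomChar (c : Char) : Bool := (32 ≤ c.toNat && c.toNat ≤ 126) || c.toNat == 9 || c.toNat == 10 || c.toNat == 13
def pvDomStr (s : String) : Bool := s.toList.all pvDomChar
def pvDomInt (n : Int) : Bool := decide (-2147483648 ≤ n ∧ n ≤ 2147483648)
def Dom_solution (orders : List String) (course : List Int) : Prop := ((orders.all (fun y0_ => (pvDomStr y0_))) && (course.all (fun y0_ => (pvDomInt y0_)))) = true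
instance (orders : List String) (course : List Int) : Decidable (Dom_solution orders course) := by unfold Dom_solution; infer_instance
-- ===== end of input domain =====

-- B replaces A's enumeration of ALL subsets of every order by a pick/skip recursion that
-- generates only combinations of the lengths requested in `course`, bucketed per length.

-- ===== PORT A =====
-- Python's dfs(level, start, origin, comb, limit), ported with `remaining` = limit - level
-- (the recursion depth still to go), which is the Python recursion's termination measure.
def dfsA (origin : List Char) : Nat → Int → List Char → PySem.Dict (List Char) Int → PySem.Dict (List Char) Int
  | 0, _, comb, d => d.insert comb (d.getD comb 0 + 1)
  | r + 1, start, comb, d =>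
      (PySem.List.pyRange start (origin.length : Int)).foldl
        (fun d i => dfsA origin r (i + 1) (comb ++ [PySem.List.pyGetD origin i ' ']) d) d

def dictA (orders : List String) : PySem.Dict (List Char) Int :=
  orders.foldl (fun d order =>
      let o := PySem.List.sorted order.toList (fun c => c) false
      (PySem.List.pyRange 1 ((o.length : Int) + 1)).foldl
        (fun d limit => dfsA o limit.toNat 0 [] d) d)
    PySem.Dict.empty

-- the body of A's `for num in course` loop
def stepA (dict : PySem.Dict (List Char) Int) (answer : List (List Char)) (num : Int) : List (List Char) :=
  let temp := dict.items.foldl (fun temp kv =>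
      if ((kv.1.length : Int) == num && decide (2 ≤ kv.2)) then temp ++ [kv] else temp) []
  if temp.length ≠ 0 then
    let max_value := (PySem.List.maxD temp (fun x => x.2) ([], 0)).2
    let result := (temp.filter (fun x => x.2 == max_value)).map (fun x => x.1)
    result.foldl (fun answer i => answer ++ [i]) answer
  else answer

def solution (orders : List String) (course : List Int) : List String :=
  let dict := dictA orders
  let answer := course.foldl (stepA dict) []
  (PySem.List.sorted answer (fun x => x) false).map String.ofList

-- ===== PORT B =====
-- _combs(chars, k): all k-combinations of chars taken by position, head first
def combsB (chars : List Char) (k : Nat) : List (List Char) :=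
  if k = 0 then [[]]
  else if chars.length < k then []
  else match chars, k with
    | c :: rest, k' + 1 => ((combsB rest k').map (fun t => c :: t)) ++ combsB rest (k' + 1)
    | _, _ => []   -- unreachable: [] has length < any k > 0

-- need = the requested sizes, deduplicated, sorted, positive only
def needB (course : List Int) : List Int :=
  (PySem.List.sorted (PySem.Set.ofList course) (fun x => x) false).foldl
    (fun acc num => if decide (1 ≤ num) then acc ++ [num] else acc) []

-- one counting dict per requested length; only combinations of those lengths are generated.
-- `for k in need: if k > len(chars): break; …` — the loop with its early break, as recursion;
-- cnt = buckets.setdefault(k, {}) followed by in-place mutation of the shared inner dict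
-- becomes getD (empty if absent) / extend / insert back.
def bucketLoop (chars : List Char) : List Int → PySem.Dict Int (PySem.Dict (List Char) Int) → PySem.Dict Int (PySem.Dict (List Char) Int)
  | [], b => b
  | k :: rest, b =>
      if decide ((chars.length : Int) < k) then b
      else
        let cnt := (combsB chars k.toNat).foldl
            (fun c comb => c.insert comb (c.getD comb 0 + 1)) (b.getD k PySem.Dict.empty)
        bucketLoop chars rest (b.insert k cnt)

def bucketsB (orders : List String) (need : List Int) : PySem.Dict Int (PySem.Dict (List Char) Int) :=
  orders.foldl (fun b order =>
      let chars := PySem.List.sorted order.toList (fun c => c) false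
      bucketLoop chars need b)
    (PySem.Dict.empty : PySem.Dict Int (PySem.Dict (List Char) Int))

-- the body of B's `for num in course` loop
def stepB (buckets : PySem.Dict Int (PySem.Dict (List Char) Int)) (answer : List (List Char)) (num : Int) : List (List Char) :=
  let cnt := buckets.getD num PySem.Dict.empty
  let best := cnt.values.foldl (fun best v => if decide (2 ≤ v) && decide (best < v) then v else best) 0
  if best ≠ 0 then
    answer ++ cnt.items.foldl (fun acc kv => if kv.2 == best then acc ++ [kv.1] else acc) []
  else answer

def solution_alt (orders : List String) (course : List Int) : List String :=
  let need := needB course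
  let buckets := bucketsB orders need
  let answer := course.foldl (stepB buckets) []
  (PySem.List.sorted answer (fun x => x) false).map String.ofList

-- ===== PRECONDITION & SPEC =====
def Spec_solution (orders : List String) (course : List Int) (out : List String) : Prop := out = solution_alt orders course
instance (orders : List String) (course : List Int) (out : List String) : Decidable (Spec_solution orders course out) := by unfold Spec_solution; infer_instance

-- ===== CLAIM (what is proved, stated in full; the proofs are below) =====
def Claim_equal_solution : Prop := ∀ (orders : List String) (course : List Int), Dom_solution orders course → Spec_solution orders course (solution orders course)

-- ===== LEMMAS AND PROOFS =====

-- the counting step both programs use on their dicts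
def cntStep (d : PySem.Dict (List Char) Int) (x : List Char) : PySem.Dict (List Char) Int :=
  d.insert x (d.getD x 0 + 1)

-- the list of combinations A's dfs generates (same traversal, dict stripped away)
def genA (origin : List Char) : Nat → Int → List Char → List (List Char)
  | 0, _, comb => [comb]
  | r + 1, start, comb =>
      (PySem.List.pyRange start (origin.length : Int)).flatMap
        (fun i => genA origin r (i + 1) (comb ++ [PySem.List.pyGetD origin i ' ']))

theorem combsB_zero (chars : List Char) : combsB chars 0 = [[]] := by
  unfold combsB; rfl

theorem combsB_eq_nil_of_lt (chars : List Char) (k : Nat) (h : chars.length < k) :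
    combsB chars k = [] := by
  unfold combsB
  rw [if_neg (by omega), if_pos h]

theorem combsB_cons (c : Char) (rest : List Char) (k : Nat) :
    combsB (c :: rest) (k + 1) = ((combsB rest k).map (fun t => c :: t)) ++ combsB rest (k + 1) := by
  by_cases h : rest.length < k
  · rw [combsB_eq_nil_of_lt _ _ (by simp only [List.length_cons]; omega),
        combsB_eq_nil_of_lt _ _ h, combsB_eq_nil_of_lt _ _ (by omega)]
    simp
  · conv_lhs => unfold combsB
    rw [if_neg (by omega), if_neg (by simp only [List.length_cons]; omega)]

theorem length_mem_combsB (chars : List Char) (k : Nat) (c : List Char) (h : c ∈ combsB chars k) :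
    c.length = k := by
  induction chars generalizing k c with
  | nil =>
      cases k with
      | zero => rw [combsB_zero] at h; simp at h; simp [h]
      | succ k => rw [combsB_eq_nil_of_lt] at h <;> simp_all
  | cons a rest ih =>
      cases k with
      | zero => rw [combsB_zero] at h; simp at h; simp [h]
      | succ k =>
          rw [combsB_cons] at h
          rcases List.mem_append.1 h with h | h
          · obtain ⟨t, ht, rfl⟩ := List.mem_map.1 h
            simp [ih k t ht]
          · exact ih _ _ h

-- generic: a fold whose step is itself a fold over a generated list is a fold over the flatMap
theorem foldl_foldl_flatMap {α β : Type} (step : β → List Char → β) (g : α → List (List Char)) :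
    ∀ (l : List α) (d : β),
      l.foldl (fun d x => (g x).foldl step d) d = ((l.flatMap g).foldl step d) := by
  intro l
  induction l with
  | nil => simp
  | cons x t ih => intro d; simp [List.foldl_append, ih]

theorem dfsA_eq (origin : List Char) :
    ∀ (r : Nat) (start : Int) (comb : List Char) (d : PySem.Dict (List Char) Int),
      dfsA origin r start comb d = (genA origin r start comb).foldl cntStep d := by
  intro r
  induction r with
  | zero => intro start comb d; simp [dfsA, genA, cntStep]
  | succ r ih =>
      intro start comb d
      show (PySem.List.pyRange start (origin.length : Int)).foldl _ d = _
      rw [show (genA origin (r+1) start comb) =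
            (PySem.List.pyRange start (origin.length : Int)).flatMap
              (fun i => genA origin r (i + 1) (comb ++ [PySem.List.pyGetD origin i ' '])) from rfl,
          ← foldl_foldl_flatMap]
      exact PySem.List.foldl_congr_mem _ _ _ _ (fun acc x _ => ih _ _ acc)

-- the structural (suffix) form of A's generation
def genS : List Char → Nat → List Char → List (List Char)
  | _, 0, comb => [comb]
  | [], _ + 1, _ => []
  | c :: rest, r + 1, comb => genS rest r (comb ++ [c]) ++ genS rest (r + 1) comb

theorem genA_eq_genS (origin : List Char) :
    ∀ (n : Nat) (start : Int), 0 ≤ start → n = origin.length - start.toNat →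
      ∀ (r : Nat) (comb : List Char),
      genA origin r start comb = genS (origin.drop start.toNat) r comb := by
  intro n
  induction n with
  | zero =>
      intro start h0 hn r comb
      have hlen : origin.length ≤ start.toNat := by omega
      have hd : origin.drop start.toNat = [] := List.drop_eq_nil_of_le hlen
      cases r with
      | zero => simp [genA, genS, hd]
      | succ r =>
          have hr : PySem.List.pyRange start (origin.length : Int) = [] :=
            PySem.List.pyRange_one_eq_nil (by omega)
          simp [genA, genS, hd, hr]
  | succ n ih =>
      intro start h0 hn r comb
      have hlt : start.toNat < origin.length := by omega
      have hsl : start < (origin.length : Int) := by omega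
      cases r with
      | zero => simp [genA, genS]
      | succ r =>
          have hd := List.drop_eq_getElem_cons (l := origin) hlt
          have hget : PySem.List.pyGetD origin start ' ' = origin[start.toNat] :=
            PySem.List.pyGetD_eq_getElem origin ' ' h0 (by exact_mod_cast hsl)
          have htail : genA origin (r+1) (start+1) comb =
              (PySem.List.pyRange (start+1) (origin.length : Int)).flatMap
                (fun i => genA origin r (i + 1) (comb ++ [PySem.List.pyGetD origin i ' '])) := rfl
          have hs1 : (start + 1).toNat = start.toNat + 1 := by omega
          calc genA origin (r+1) start comb
              = (PySem.List.pyRange start (origin.length : Int)).flatMap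
                  (fun i => genA origin r (i + 1) (comb ++ [PySem.List.pyGetD origin i ' '])) := rfl
            _ = genA origin r (start+1) (comb ++ [origin[start.toNat]]) ++
                genA origin (r+1) (start+1) comb := by
                  rw [PySem.List.pyRange_one_cons hsl, List.flatMap_cons, htail, hget]
            _ = genS (origin.drop (start.toNat + 1)) r (comb ++ [origin[start.toNat]]) ++
                genS (origin.drop (start.toNat + 1)) (r+1) comb := by
                  rw [ih (start+1) (by omega) (by omega) r,
                      ih (start+1) (by omega) (by omega) (r+1), hs1]
            _ = genS (origin.drop start.toNat) (r+1) comb := by rw [hd]; rfl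

theorem genS_eq_combsB (l : List Char) :
    ∀ (r : Nat) (comb : List Char), genS l r comb = (combsB l r).map (fun t => comb ++ t) := by
  induction l with
  | nil =>
      intro r comb
      cases r with
      | zero => simp [genS, combsB_zero]
      | succ r => rw [combsB_eq_nil_of_lt _ _ (by simp)]; simp [genS]
  | cons c rest ih =>
      intro r comb
      cases r with
      | zero => simp [genS, combsB_zero]
      | succ r =>
          rw [combsB_cons]
          show genS rest r (comb ++ [c]) ++ genS rest (r + 1) comb = _
          rw [ih r (comb ++ [c]), ih (r + 1) comb]
          simp [List.map_map, Function.comp]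

theorem genA_zero_eq_combsB (origin : List Char) (r : Nat) :
    genA origin r 0 [] = combsB origin r := by
  rw [genA_eq_genS origin origin.length 0 (by omega) (by simp), genS_eq_combsB]
  simp

def sortedChars (order : String) : List Char := PySem.List.sorted order.toList (fun c => c) false

-- everything A's dfs loop ever counts, as one flat list
def listA (orders : List String) : List (List Char) :=
  orders.flatMap (fun order =>
    (PySem.List.pyRange 1 (((sortedChars order).length : Int) + 1)).flatMap
      (fun limit => combsB (sortedChars order) limit.toNat))

theorem dictA_eq (orders : List String) :
    dictA orders = PySem.Dict.counter (listA orders) := by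
  unfold dictA
  rw [← PySem.Dict.foldl_insert_getD_add_one_eq_counter, listA, ← foldl_foldl_flatMap]
  apply PySem.List.foldl_congr_mem
  intro d order _
  show (PySem.List.pyRange 1 (((sortedChars order).length : Int) + 1)).foldl
          (fun d limit => dfsA (sortedChars order) limit.toNat 0 [] d) d = _
  rw [← foldl_foldl_flatMap]
  apply PySem.List.foldl_congr_mem
  intro d limit _
  rw [dfsA_eq, genA_zero_eq_combsB]
  rfl

theorem Set_filter_add {α : Type} [BEq α] [LawfulBEq α] (s : PySem.Set α) (p : α → Bool) (x : α) :
    (s.add x).filter p = if p x then PySem.Set.add (s.filter p) x else s.filter p := by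
  by_cases hx : x ∈ s
  · have h1 : s.add x = s := by simp [PySem.Set.add, hx]
    by_cases hp : p x = true
    · have hx2 : x ∈ s.filter p := List.mem_filter.2 ⟨hx, hp⟩
      have h2 : PySem.Set.add (s.filter p) x = s.filter p := by simp [PySem.Set.add, hx2]
      simp [h1, hp, h2]
    · simp [h1, hp]
  · have h1 : s.add x = s ++ [x] := by simp [PySem.Set.add, hx]
    by_cases hp : p x = true
    · have hx2 : x ∉ s.filter p := fun h => hx (List.mem_filter.1 h).1
      have h2 : PySem.Set.add (s.filter p) x = s.filter p ++ [x] := by simp [PySem.Set.add, hx2]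
      simp [h1, hp, h2, List.filter_append]
    · simp [h1, hp, List.filter_append]

theorem Set_ofList_filter {α : Type} [BEq α] [LawfulBEq α] (p : α → Bool) (xs : List α) :
    (PySem.Set.ofList xs).filter p = PySem.Set.ofList (xs.filter p) := by
  have key : ∀ (xs : List α) (s : PySem.Set α),
      (xs.foldl PySem.Set.add s).filter p = (xs.filter p).foldl PySem.Set.add (s.filter p) := by
    intro xs
    induction xs with
    | nil => intro s; rfl
    | cons x t ih =>
        intro s
        show (t.foldl PySem.Set.add (s.add x)).filter p = _
        rw [ih (s.add x), Set_filter_add]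
        by_cases hp : p x = true <;> simp [hp]
  rw [PySem.Set.ofList_eq_foldl, PySem.Set.ofList_eq_foldl, key]
  rfl

-- per order: among all generated combinations, those of length num are exactly
-- the num-combinations (when 1 ≤ num ≤ len), else none
theorem perOrder_filter (o : List Char) (num : Int) :
    ((PySem.List.pyRange 1 ((o.length : Int) + 1)).flatMap
        (fun limit => combsB o limit.toNat)).filter (fun c => ((c.length : Int) == num)) =
      if 1 ≤ num ∧ num ≤ (o.length : Int) then combsB o num.toNat else [] := by
  rw [List.filter_flatMap]
  have inner : ∀ limit ∈ PySem.List.pyRange 1 ((o.length : Int) + 1),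
      (combsB o limit.toNat).filter (fun c => ((c.length : Int) == num)) =
        if limit = num then combsB o limit.toNat else [] := by
    intro limit hmem
    obtain ⟨h1, h2⟩ := PySem.List.mem_pyRange_one.1 hmem
    by_cases h : limit = num
    · rw [if_pos h]
      apply List.filter_eq_self.2
      intro c hc
      have := length_mem_combsB o limit.toNat c hc
      simp [this, ← h]
      omega
    · rw [if_neg h]
      apply List.filter_eq_nil_iff.2
      intro c hc
      have := length_mem_combsB o limit.toNat c hc
      simp [this]
      omega
  by_cases H : 1 ≤ num ∧ num ≤ (o.length : Int)
  · rw [if_pos H]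
    rw [PySem.List.pyRange_one_append 1 num ((o.length : Int) + 1) (by omega) (by omega),
        PySem.List.pyRange_one_cons (by omega : num < (o.length : Int) + 1)]
    rw [List.flatMap_append, List.flatMap_cons]
    have hleft : (PySem.List.pyRange 1 num).flatMap
        (fun limit => (combsB o limit.toNat).filter (fun c => ((c.length : Int) == num))) = [] := by
      apply List.flatMap_eq_nil_iff.2
      intro x hx
      obtain ⟨hx1, hx2⟩ := PySem.List.mem_pyRange_one.1 hx
      rw [inner x (PySem.List.mem_pyRange_one.2 ⟨hx1, by omega⟩), if_neg (by omega)]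
    have hright : (PySem.List.pyRange (num + 1) ((o.length : Int) + 1)).flatMap
        (fun limit => (combsB o limit.toNat).filter (fun c => ((c.length : Int) == num))) = [] := by
      apply List.flatMap_eq_nil_iff.2
      intro x hx
      obtain ⟨hx1, hx2⟩ := PySem.List.mem_pyRange_one.1 hx
      rw [inner x (PySem.List.mem_pyRange_one.2 ⟨by omega, hx2⟩), if_neg (by omega)]
    rw [hleft, hright]
    rw [inner num (PySem.List.mem_pyRange_one.2 ⟨by omega, by omega⟩), if_pos rfl]
    simp
  · rw [if_neg H]
    apply List.flatMap_eq_nil_iff.2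
    intro x hx
    obtain ⟨hx1, hx2⟩ := PySem.List.mem_pyRange_one.1 hx
    rw [inner x hx, if_neg]
    intro heq
    exact H ⟨by omega, by omega⟩

-- what B's bucket for length num counts, as one flat list
def listB (orders : List String) (num : Int) : List (List Char) :=
  orders.flatMap (fun order =>
    if 1 ≤ num ∧ num ≤ ((sortedChars order).length : Int) then combsB (sortedChars order) num.toNat
    else [])

theorem listA_filter (orders : List String) (num : Int) :
    (listA orders).filter (fun c => ((c.length : Int) == num)) = listB orders num := by
  rw [listA, listB, List.filter_flatMap]
  apply List.flatMap_congr
  intro order _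
  exact perOrder_filter (sortedChars order) num

theorem needB_eq (course : List Int) :
    needB course = (PySem.List.sorted (PySem.Set.ofList course) (fun x => x) false).filter
      (fun num => decide (1 ≤ num)) := by
  simpa [needB] using PySem.List.foldl_append_if (fun num => decide (1 ≤ num)) id
    (PySem.List.sorted (PySem.Set.ofList course) (fun x => x) false) []

theorem mem_needB (course : List Int) (num : Int) :
    num ∈ needB course ↔ num ∈ course ∧ 1 ≤ num := by
  rw [needB_eq, List.mem_filter, PySem.List.mem_sorted, PySem.Set.mem_ofList]
  simp

theorem pairwise_needB (course : List Int) : (needB course).Pairwise (· < ·) := by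
  rw [needB_eq]
  exact (PySem.List.sorted_ofList_pairwise_lt course).filter _

theorem bucketLoop_getD (chars : List Char) :
    ∀ (need' : List Int), need'.Pairwise (· < ·) →
    ∀ (b : PySem.Dict Int (PySem.Dict (List Char) Int)) (num : Int),
    (bucketLoop chars need' b).getD num PySem.Dict.empty
    = if num ∈ need' ∧ num ≤ (chars.length : Int)
      then (combsB chars num.toNat).foldl
            (fun c comb => c.insert comb (c.getD comb 0 + 1)) (b.getD num PySem.Dict.empty)
      else b.getD num PySem.Dict.empty := by
  intro need'
  induction need' with
  | nil => intro _ b num; simp [bucketLoop]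
  | cons k t ih =>
      intro hpw b num
      have hkt : ∀ x ∈ t, k < x := fun x hx => List.rel_of_pairwise_cons hpw hx
      have htpw : t.Pairwise (· < ·) := hpw.of_cons
      by_cases hbrk : (chars.length : Int) < k
      · have e0 : bucketLoop chars (k :: t) b = b := by
          show (if decide ((chars.length : Int) < k) = true then b else _) = b
          rw [if_pos (by simpa using hbrk)]
        rw [e0, if_neg]
        intro ⟨h1, h2⟩
        rcases List.mem_cons.1 h1 with h | h
        · omega
        · have := hkt num h; omega
      · have e0 : bucketLoop chars (k :: t) b = bucketLoop chars t (b.insert k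
            ((combsB chars k.toNat).foldl
              (fun c comb => c.insert comb (c.getD comb 0 + 1)) (b.getD k PySem.Dict.empty))) := by
          show (if decide ((chars.length : Int) < k) = true then b else _) = _
          rw [if_neg (by simpa using hbrk)]
        rw [e0, ih htpw]
        by_cases hk : num = k
        · subst hk
          have hnt : ¬ (num ∈ t ∧ num ≤ (chars.length : Int)) := fun h => by
            have := hkt num h.1; omega
          rw [if_neg hnt, PySem.Dict.getD_insert_self,
              if_pos (show num ∈ num :: t ∧ num ≤ (chars.length : Int) from ⟨by simp, by omega⟩)]
        · have e1 : (b.insert k ((combsB chars k.toNat).foldl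
              (fun c comb => c.insert comb (c.getD comb 0 + 1)) (b.getD k PySem.Dict.empty))).getD
                num PySem.Dict.empty = b.getD num PySem.Dict.empty :=
            PySem.Dict.getD_insert_of_ne b _ _ hk
          rw [e1]
          by_cases hmem : num ∈ t ∧ num ≤ (chars.length : Int)
          · rw [if_pos hmem,
                if_pos (show num ∈ k :: t ∧ num ≤ (chars.length : Int) from
                  ⟨List.mem_cons_of_mem _ hmem.1, hmem.2⟩)]
          · rw [if_neg hmem,
                if_neg (fun h => hmem ⟨(List.mem_cons.1 h.1).resolve_left hk, h.2⟩)]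

theorem bucketsB_getD (orders : List String) (need' : List Int) (hpw : need'.Pairwise (· < ·)) (num : Int) :
    (bucketsB orders need').getD num PySem.Dict.empty
    = if num ∈ need'
      then PySem.Dict.counter (orders.flatMap (fun order =>
          if num ≤ ((sortedChars order).length : Int)
          then combsB (sortedChars order) num.toNat else []))
      else PySem.Dict.empty := by
  have aux : ∀ (os : List String) (b : PySem.Dict Int (PySem.Dict (List Char) Int)),
      (os.foldl (fun b order =>
          let chars := PySem.List.sorted order.toList (fun c => c) false
          bucketLoop chars need' b) b).getD num PySem.Dict.empty
      = if num ∈ need'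
        then (os.flatMap (fun order =>
            if num ≤ ((PySem.List.sorted order.toList (fun c => c) false).length : Int)
            then combsB (PySem.List.sorted order.toList (fun c => c) false) num.toNat else [])).foldl
            (fun c comb => c.insert comb (c.getD comb 0 + 1)) (b.getD num PySem.Dict.empty)
        else b.getD num PySem.Dict.empty := by
    intro os
    induction os with
    | nil => intro b; simp
    | cons order t ih =>
        intro b
        rw [List.foldl_cons, ih]
        have hstep := bucketLoop_getD (PySem.List.sorted order.toList (fun c => c) false)
          need' hpw b num
        by_cases hmem : num ∈ need'
        · rw [if_pos hmem, if_pos hmem, List.flatMap_cons, List.foldl_append, hstep]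
          by_cases hle : num ≤ ((PySem.List.sorted order.toList (fun c => c) false).length : Int)
          · rw [if_pos ⟨hmem, hle⟩, if_pos hle]
          · rw [if_neg (fun h => hle h.2), if_neg hle]
            rfl
        · rw [if_neg hmem, if_neg hmem, hstep, if_neg (fun h => hmem h.1)]
  unfold bucketsB
  rw [aux orders PySem.Dict.empty, PySem.Dict.getD_empty]
  simp only [sortedChars]
  by_cases hmem : num ∈ need'
  · rw [if_pos hmem, if_pos hmem, PySem.Dict.foldl_insert_getD_add_one_eq_counter]
  · rw [if_neg hmem, if_neg hmem]

theorem bucketsB_counter (orders : List String) (course : List Int) (num : Int)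
    (hnum : num ∈ course) :
    (bucketsB orders (needB course)).getD num PySem.Dict.empty
    = PySem.Dict.counter (listB orders num) := by
  rw [bucketsB_getD orders (needB course) (pairwise_needB course) num]
  by_cases h1 : 1 ≤ num
  · rw [if_pos ((mem_needB course num).2 ⟨hnum, h1⟩), listB]
    congr 1
    apply List.flatMap_congr
    intro order _
    by_cases hle : num ≤ ((sortedChars order).length : Int)
    · rw [if_pos hle, if_pos ⟨h1, hle⟩]
    · rw [if_neg hle, if_neg (fun h => hle h.2)]
  · rw [if_neg (fun h => h1 ((mem_needB course num).1 h).2)]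
    have hnil : listB orders num = [] := by
      rw [listB]
      apply List.flatMap_eq_nil_iff.2
      intro order _
      rw [if_neg (fun h => h1 h.1)]
    rw [hnil]
    rfl

-- A's temp list, re-expressed over B's per-length counter
theorem temp_eq (orders : List String) (num : Int) :
    (PySem.Dict.counter (listA orders)).items.filter
        (fun kv => ((kv.1.length : Int) == num && decide (2 ≤ kv.2)))
    = (PySem.Dict.counter (listB orders num)).items.filter (fun kv => decide (2 ≤ kv.2)) := by
  rw [PySem.Dict.items_counter, PySem.Dict.items_counter, List.filter_map, List.filter_map]
  have hsplit : (PySem.Set.ofList (listA orders)).filter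
        ((fun kv => ((kv.1.length : Int) == num && decide (2 ≤ kv.2))) ∘
          (fun k => (k, (List.count k (listA orders) : Int))))
      = ((PySem.Set.ofList (listA orders)).filter
          (fun k => ((k.length : Int) == num))).filter
          (fun k => decide (2 ≤ (List.count k (listA orders) : Int))) := by
    rw [List.filter_filter]
    apply List.filter_congr
    intro k _
    simp [Bool.and_comm]
  rw [hsplit, Set_ofList_filter, listA_filter]
  have hcnt : ∀ k ∈ (PySem.Set.ofList (listB orders num)), List.count k (listA orders) = List.count k (listB orders num) := by
    intro k hk
    have hk2 : k ∈ listB orders num := (PySem.Set.mem_ofList _ k).1 hk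
    rw [← listA_filter] at hk2
    have hp := (List.mem_filter.1 hk2).2
    rw [← listA_filter]
    exact (List.count_filter (p := fun c => ((c.length : Int) == num)) (a := k) hp).symm
  have hfc : ((PySem.Set.ofList (listB orders num)).filter
        (fun k => decide (2 ≤ (List.count k (listA orders) : Int))))
      = ((PySem.Set.ofList (listB orders num)).filter
        (fun k => decide (2 ≤ (List.count k (listB orders num) : Int)))) := by
    apply List.filter_congr
    intro k hk
    rw [hcnt k hk]
  rw [hfc]
  apply List.map_congr_left
  intro k hk
  rw [hcnt k (List.mem_filter.1 hk).1]

-- B's running max over the bucket's values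
theorem best_spec (vs : List Int) :
    ∀ (b0 : Int),
      (vs.foldl (fun best v => if decide (2 ≤ v) && decide (best < v) then v else best) b0 = b0 ∨
        (vs.foldl (fun best v => if decide (2 ≤ v) && decide (best < v) then v else best) b0 ∈ vs ∧
         2 ≤ vs.foldl (fun best v => if decide (2 ≤ v) && decide (best < v) then v else best) b0)) ∧
      b0 ≤ vs.foldl (fun best v => if decide (2 ≤ v) && decide (best < v) then v else best) b0 ∧
      ∀ v ∈ vs, 2 ≤ v → v ≤ vs.foldl (fun best v => if decide (2 ≤ v) && decide (best < v) then v else best) b0 := by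
  induction vs with
  | nil => intro b0; simp
  | cons v t ih =>
      intro b0
      rw [List.foldl_cons]
      set b1 := if decide (2 ≤ v) && decide (b0 < v) then v else b0 with hb1
      obtain ⟨h1, h2, h3⟩ := ih b1
      have hb1cases : b1 = b0 ∨ (b1 = v ∧ 2 ≤ v) := by
        rw [hb1]; split
        · rename_i h; simp at h; exact Or.inr ⟨rfl, h.1⟩
        · exact Or.inl rfl
      have hb0le : b0 ≤ b1 := by
        rw [hb1]; split
        · rename_i h; simp at h; omega
        · omega
      refine ⟨?_, by omega, ?_⟩
      · rcases h1 with h | h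
        · rcases hb1cases with h' | h'
          · exact Or.inl (by omega)
          · exact Or.inr ⟨by rw [h, h'.1]; exact List.mem_cons_self, by omega⟩
        · exact Or.inr ⟨List.mem_cons_of_mem _ h.1, h.2⟩
      · intro w hw h2w
        rcases List.mem_cons.1 hw with h | h
        · subst h
          have : w ≤ b1 := by
            rw [hb1]; split
            · omega
            · rename_i hcond; simp at hcond; omega
          omega
        · exact h3 w h h2w

-- the per-`num` body of A, over the filtered items, equals the per-`num` body of B
theorem finalStep' (items temp : List (List Char × Int)) (best : Int) (answer : List (List Char))
    (htemp : temp = items.filter (fun kv => decide (2 ≤ kv.2)))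
    (hb1 : best = 0 ∨ (best ∈ items.map (fun kv => kv.2) ∧ 2 ≤ best))
    (hb3 : ∀ v ∈ items.map (fun kv => kv.2), 2 ≤ v → v ≤ best) :
    (if temp.length ≠ 0 then
       ((temp.filter (fun x => x.2 == (PySem.List.maxD temp (fun x => x.2) ([], 0)).2)).map
          (fun x => x.1)).foldl (fun answer i => answer ++ [i]) answer
     else answer)
    = (if best ≠ 0 then
        answer ++ items.foldl (fun acc kv => if kv.2 == best then acc ++ [kv.1] else acc) []
       else answer) := by
  subst htemp
  set temp := items.filter (fun kv => decide (2 ≤ kv.2)) with htemp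
  by_cases hT : temp = []
  · have hnone : ∀ kv ∈ items, ¬ (2 ≤ kv.2) := by
      intro kv hkv h2
      have : kv ∈ temp := htemp ▸ List.mem_filter.2 ⟨hkv, by simpa using h2⟩
      simp [hT] at this
    have hbz : best = 0 := by
      rcases hb1 with h | h
      · exact h
      · obtain ⟨kv, hkv, hkveq⟩ := List.mem_map.1 h.1
        exact absurd (hkveq ▸ h.2) (hnone kv hkv)
    simp [hT, hbz]
  · have hTlen : temp.length ≠ 0 := fun h => hT (List.length_eq_zero_iff.1 h)
    have hmmem : PySem.List.maxD temp (fun x => x.2) ([], 0) ∈ temp :=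
      PySem.List.maxD_mem temp (fun x => x.2) ([], 0) hT
    have hmf := List.mem_filter.1 (htemp ▸ hmmem)
    rw [← htemp] at hmf
    have hmitems : PySem.List.maxD temp (fun x => x.2) ([], 0) ∈ items := hmf.1
    have hm2 : 2 ≤ (PySem.List.maxD temp (fun x => x.2) ([], 0)).2 := by simpa using hmf.2
    have hmax : ∀ y ∈ temp, y.2 ≤ (PySem.List.maxD temp (fun x => x.2) ([], 0)).2 :=
      PySem.List.le_key_maxD temp (fun x => x.2) ([], 0) hT
    have hle1 : (PySem.List.maxD temp (fun x => x.2) ([], 0)).2 ≤ best :=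
      hb3 _ (List.mem_map.2 ⟨_, hmitems, rfl⟩) hm2
    have hle2 : best ≤ (PySem.List.maxD temp (fun x => x.2) ([], 0)).2 := by
      rcases hb1 with h | h
      · omega
      · obtain ⟨kv, hkv, hkveq⟩ := List.mem_map.1 h.1
        have hkv2 : kv.2 = best := hkveq
        have hkvt : kv ∈ temp := htemp ▸ List.mem_filter.2
          ⟨hkv, by simp only [decide_eq_true_eq]; omega⟩
        calc best = kv.2 := hkv2.symm
          _ ≤ _ := hmax kv hkvt
    have hbm : best = (PySem.List.maxD temp (fun x => x.2) ([], 0)).2 := le_antisymm hle2 hle1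
    have hbne : best ≠ 0 := by omega
    rw [if_pos hTlen, if_pos hbne, PySem.List.foldl_append_singleton]
    congr 1
    have hBfold : items.foldl (fun acc kv => if kv.2 == best then acc ++ [kv.1] else acc) []
        = (items.filter (fun kv => kv.2 == best)).map (fun kv => kv.1) := by
      simpa using PySem.List.foldl_append_if (fun kv : List Char × Int => kv.2 == best)
        (fun kv => kv.1) items []
    rw [hBfold]
    congr 1
    rw [← hbm, htemp, List.filter_filter]
    apply List.filter_congr
    intro kv _
    by_cases h : kv.2 = best
    · have h2 : decide (2 ≤ kv.2) = true := by simp only [decide_eq_true_eq]; omega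
      have h3 : (2 : Int) ≤ best := by omega
      simp [h, h3]
    · simp [h]

theorem stepAB (orders : List String) (course : List Int) (num : Int) (hnum : num ∈ course)
    (answer : List (List Char)) :
    stepA (PySem.Dict.counter (listA orders)) answer num
    = stepB (bucketsB orders (needB course)) answer num := by
  have htempA : (PySem.Dict.counter (listA orders)).items.foldl (fun temp kv =>
      if ((kv.1.length : Int) == num && decide (2 ≤ kv.2)) then temp ++ [kv] else temp) []
      = (PySem.Dict.counter (listB orders num)).items.filter (fun kv => decide (2 ≤ kv.2)) := by
    rw [← temp_eq orders num]
    simpa using PySem.List.foldl_append_if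
      (fun kv : List Char × Int => ((kv.1.length : Int) == num && decide (2 ≤ kv.2)))
      id (PySem.Dict.counter (listA orders)).items []
  have hvals : ∀ d : PySem.Dict (List Char) Int, d.values = d.items.map (fun kv => kv.2) :=
    fun _ => rfl
  simp only [stepA, stepB, bucketsB_counter orders course num hnum, htempA, hvals]
  exact finalStep' (PySem.Dict.counter (listB orders num)).items _ _ answer rfl
    ((best_spec ((PySem.Dict.counter (listB orders num)).items.map (fun kv => kv.2)) 0).1)
    ((best_spec ((PySem.Dict.counter (listB orders num)).items.map (fun kv => kv.2)) 0).2.2)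

-- ===== VERDICT (by name: the statement is the Claim_ definition above) =====
theorem solution_spec : Claim_equal_solution := by
  intro orders course _
  show solution orders course = solution_alt orders course
  rw [solution, solution_alt]
  have : course.foldl (stepA (dictA orders)) [] = course.foldl (stepB (bucketsB orders (needB course))) [] := by
    rw [dictA_eq]
    exact PySem.List.foldl_congr_mem course _ _ []
      (fun acc num hmem => stepAB orders course num hmem acc)
  rw [this]
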